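-- pv_equiv track=rewrite | github.com/Crying-Soul/PIAA | lb5/task2.py | get_pattern_parts
-- ===== SOURCE A (Python) =====
-- def get_pattern_parts(pattern, joker, verbose=False):
--     if verbose:
--         log_section("Разделение шаблона по джокеру")
--     parts = {}
--     last_j = -1
--
--     for i, char in enumerate(pattern):
--         if char == joker:
--             if last_j < i - 1:
--                 sub = pattern[last_j + 1: i]
--                 parts.setdefault(sub, []).append(last_j + 1)
--                 if verbose:
--                     log_action(f"Найден подшаблон: '{sub}' (оффсет: {last_j + 1})")
--             last_j = i
--
--     if last_j != len(pattern) - 1: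
--         sub = pattern[last_j + 1:]
--         parts.setdefault(sub, []).append(last_j + 1)
--         if verbose:
--             log_action(f"Найден подшаблон: '{sub}' (оффсет: {last_j + 1})")
--
--     if verbose:
--         log_success(f"Итоговые подшаблоны: {parts}")
--     return parts
-- ===== SOURCE B (Python) =====
-- def get_pattern_parts(pattern, joker, verbose=False):
--     if verbose:
--         log_section("Разделение шаблона по джокеру")
--     parts = {}
--     positions = [i for i, c in enumerate(pattern) if c == joker]
--     for prev, cur in zip([-1] + positions, positions + [len(pattern)]):
--         sub = pattern[prev + 1:cur]
--         if sub:
--             parts.setdefault(sub, []).append(prev + 1)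
--             if verbose:
--                 log_action(f"Найден подшаблон: '{sub}' (оффсет: {prev + 1})")
--     if verbose:
--         log_success(f"Итоговые подшаблоны: {parts}")
--     return parts
-- ===== Notes on version B (the rewrite author's own statement) =====
-- stated objective: alternative
-- what changed: Replaces A's single stateful scan (last_j accumulator plus a trailing-segment post-handler) by first computing the list of joker positions, then one uniform pass over consecutive boundary pairs zip([-1]+positions, positions+[len]) that appends each non-empty slice; no special-cased trailing segment.
-- outside the precondition, e.g. on get_pattern_parts('a*b', '*', True): A raises NameError, B raises NameError
import Mathlib
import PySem

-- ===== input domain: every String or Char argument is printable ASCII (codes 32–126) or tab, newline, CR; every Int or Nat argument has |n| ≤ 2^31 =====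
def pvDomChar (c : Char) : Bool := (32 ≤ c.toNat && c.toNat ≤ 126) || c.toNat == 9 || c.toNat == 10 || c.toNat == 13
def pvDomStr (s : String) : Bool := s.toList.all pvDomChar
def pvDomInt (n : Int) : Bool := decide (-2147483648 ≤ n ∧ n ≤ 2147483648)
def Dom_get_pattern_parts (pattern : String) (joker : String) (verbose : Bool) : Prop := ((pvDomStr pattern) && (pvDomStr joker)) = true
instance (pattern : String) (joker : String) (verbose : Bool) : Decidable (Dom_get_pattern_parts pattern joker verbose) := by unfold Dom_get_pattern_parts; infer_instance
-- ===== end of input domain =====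

-- B replaces A's stateful scan (last_j + trailing post-handler) by a joker-position
-- table and one uniform pass over consecutive boundary pairs (objective: alternative;
-- equivalence is about the RETURN value; the verbose logging side effect is not modelled).

-- ===== PORT A =====
-- one iteration of A's 'for i, char in enumerate(pattern)' loop; state = (parts, last_j)
def aStep (pattern joker : String) (st : PySem.Dict String (List Int) × Int) (p : Int × Char) : PySem.Dict String (List Int) × Int :=
  if String.ofList [p.2] == joker then
    if st.2 < p.1 - 1 then
      (st.1.modify (PySem.Str.slice pattern (some (st.2 + 1)) (some p.1)) [] (fun l => l ++ [st.2 + 1]), p.1)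
    else (st.1, p.1)
  else st

-- A's trailing 'if last_j != len(pattern) - 1' block
def aFin (pattern : String) (st : PySem.Dict String (List Int) × Int) : PySem.Dict String (List Int) :=
  if st.2 ≠ PySem.Str.len pattern - 1 then
    st.1.modify (PySem.Str.slice pattern (some (st.2 + 1)) none) [] (fun l => l ++ [st.2 + 1])
  else st.1

def get_pattern_parts (pattern : String) (joker : String) (verbose : Bool) : List (String × List Int) :=
  (aFin pattern ((PySem.List.enumerate pattern.toList 0).foldl (aStep pattern joker) (PySem.Dict.empty, -1))).items

-- ===== PORT B =====
-- body of B's 'for prev, cur in zip([-1] + positions, positions + [len(pattern)])'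
def bStep (pattern : String) (d : PySem.Dict String (List Int)) (pc : Int × Int) : PySem.Dict String (List Int) :=
  let sub := PySem.Str.slice pattern (some (pc.1 + 1)) (some pc.2)
  if sub ≠ "" then d.modify sub [] (fun l => l ++ [pc.1 + 1]) else d

def get_pattern_parts_alt (pattern : String) (joker : String) (verbose : Bool) : List (String × List Int) :=
  let positions := ((PySem.List.enumerate pattern.toList 0).filter (fun p => String.ofList [p.2] == joker)).map (·.1)
  ((List.zip ((-1) :: positions) (positions ++ [PySem.Str.len pattern])).foldl (bStep pattern) PySem.Dict.empty).items

-- ===== PRECONDITION & SPEC =====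
-- Pre_ excludes verbose = true: there A (and B alike) raises NameError, since the module's
-- logging helpers (log_section/log_action/log_success) are not defined in the shown context.
def Pre_get_pattern_parts (pattern : String) (joker : String) (verbose : Bool) : Prop := verbose = false
instance (pattern : String) (joker : String) (verbose : Bool) : Decidable (Pre_get_pattern_parts pattern joker verbose) := by unfold Pre_get_pattern_parts; infer_instance
def pvWitness_get_pattern_parts : String × String × Bool := ("ab*c*", "*", false)
def Spec_get_pattern_parts (pattern : String) (joker : String) (verbose : Bool) (out : List (String × List Int)) : Prop := out = get_pattern_parts_alt pattern joker verbose
instance (pattern : String) (joker : String) (verbose : Bool) (out : List (String × List Int)) : Decidable (Spec_get_pattern_parts pattern joker verbose out) := by unfold Spec_get_pattern_parts; infer_instance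

-- ===== CLAIM (what is proved, stated in full; the proofs are below) =====
def Claim_equal_get_pattern_parts : Prop := ∀ (pattern : String) (joker : String) (verbose : Bool), Dom_get_pattern_parts pattern joker verbose → Pre_get_pattern_parts pattern joker verbose → Spec_get_pattern_parts pattern joker verbose (get_pattern_parts pattern joker verbose)

-- ===== LEMMAS AND PROOFS =====

lemma slice_toList_eq (pattern : String) (a b : Int) (h0 : 0 ≤ a) (hb : 0 ≤ b) :
    (PySem.Str.slice pattern (some a) (some b)).toList = (pattern.toList.drop a.toNat).take (b.toNat - a.toNat) := by
  rw [PySem.Str.toList_slice, PySem.Chars.slice_eq_listSlice, PySem.List.slice_toNat _ h0 hb]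

lemma slice_empty_iff (pattern : String) (a b : Int) (h0 : 0 ≤ a) (hb : 0 ≤ b)
    (hble : b ≤ (pattern.length : Int)) :
    PySem.Str.slice pattern (some a) (some b) = "" ↔ b ≤ a := by
  rw [← String.toList_eq_nil_iff, slice_toList_eq pattern a b h0 hb, List.eq_nil_iff_length_eq_zero,
      List.length_take, List.length_drop, String.length_toList]
  omega

lemma slice_len_eq_none (pattern : String) (a : Int) (h0 : 0 ≤ a) :
    PySem.Str.slice pattern (some a) (some (pattern.length : Int)) = PySem.Str.slice pattern (some a) none := by
  apply String.toList_inj.mp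
  rw [slice_toList_eq pattern a _ h0 (by omega), PySem.Str.toList_slice,
      PySem.Chars.slice_eq_listSlice, PySem.List.slice_from _ h0]
  apply List.take_of_length_le
  simp only [List.length_drop, String.length_toList]
  omega

lemma gpp_key (pattern joker : String) (es : List (Int × Char)) :
    ∀ (d : PySem.Dict String (List Int)) (last : Int),
    -1 ≤ last → last < (pattern.length : Int) →
    (es.map Prod.fst).Pairwise (· < ·) →
    (∀ j ∈ es.map Prod.fst, last < j ∧ j < (pattern.length : Int)) →
    aFin pattern (es.foldl (aStep pattern joker) (d, last))
      = (List.zip (last :: (es.filter (fun p => String.ofList [p.2] == joker)).map (·.1))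
          ((es.filter (fun p => String.ofList [p.2] == joker)).map (·.1) ++ [PySem.Str.len pattern])).foldl (bStep pattern) d := by
  have hL : PySem.Str.len pattern = (pattern.length : Int) := by
    rw [PySem.Str.len_eq, String.length_toList]
  induction es with
  | nil =>
    intro d last h0 hlt _ _
    simp only [List.foldl_nil, List.filter_nil, List.map_nil, List.nil_append, List.zip_cons_cons,
      List.zip_nil_right, List.foldl_cons, List.foldl_nil, aFin, bStep, hL]
    rcases eq_or_ne last ((pattern.length : Int) - 1) with he | he
    · have hs : PySem.Str.slice pattern (some (pattern.length : Int)) (some (pattern.length : Int)) = "" := by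
        rw [slice_empty_iff pattern _ _ (by omega) (by omega) (by omega)]
      simp [he, hs]
    · have hne : PySem.Str.slice pattern (some (last + 1)) (some (pattern.length : Int)) ≠ "" := by
        rw [Ne, slice_empty_iff pattern _ _ (by omega) (by omega) (by omega)]; omega
      have hne' : PySem.Str.slice pattern (some (last + 1)) none ≠ "" := by
        rw [← slice_len_eq_none pattern (last + 1) (by omega)]; exact hne
      simp [he, hne', slice_len_eq_none pattern (last + 1) (by omega)]
  | cons p rest ih =>
    intro d last h0 hlt hp hmem
    obtain ⟨i, c⟩ := p
    have hpt : (rest.map Prod.fst).Pairwise (· < ·) := (List.pairwise_cons.mp (by simpa using hp)).2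
    have hph : ∀ j ∈ rest.map Prod.fst, i < j := (List.pairwise_cons.mp (by simpa using hp)).1
    have hmi : last < i ∧ i < (pattern.length : Int) := hmem i (by simp)
    have hmr : ∀ j ∈ rest.map Prod.fst, last < j ∧ j < (pattern.length : Int) := by
      intro j hj; exact hmem j (by simp [hj])
    by_cases hc : (String.ofList [c] == joker) = true
    · by_cases h2 : last < i - 1
      · have hsub : PySem.Str.slice pattern (some (last + 1)) (some i) ≠ "" := by
          rw [Ne, slice_empty_iff pattern _ _ (by omega) (by omega) (by omega)]; omega
        simp only [List.foldl_cons, aStep, hc, if_true, h2, List.filter_cons, List.map_cons,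
          List.cons_append, List.zip_cons_cons]
        rw [ih _ i (by omega) (by omega) hpt (fun j hj => ⟨hph j hj, (hmr j hj).2⟩)]
        simp [bStep, hsub]
      · have hsub : PySem.Str.slice pattern (some (last + 1)) (some i) = "" := by
          rw [slice_empty_iff pattern _ _ (by omega) (by omega) (by omega)]; omega
        simp only [List.foldl_cons, aStep, hc, if_true, h2, if_false, List.filter_cons,
          List.map_cons, List.cons_append, List.zip_cons_cons]
        rw [ih _ i (by omega) (by omega) hpt (fun j hj => ⟨hph j hj, (hmr j hj).2⟩)]
        simp [bStep, hsub]
    · simp only [List.foldl_cons, aStep, hc, List.filter_cons]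
      rw [if_neg (by simpa using hc)]
      exact ih d last h0 hlt hpt hmr

-- ===== VERDICT (by name: the statement is the Claim_ definition above) =====
theorem get_pattern_parts_spec : Claim_equal_get_pattern_parts := by
  intro pattern joker verbose _ _
  unfold Spec_get_pattern_parts get_pattern_parts get_pattern_parts_alt
  rw [gpp_key pattern joker _ PySem.Dict.empty (-1) (by omega) (by omega)
      (by rw [List.pairwise_map]; exact PySem.List.pairwise_lt_enumerate pattern.toList 0)
      (by intro j hj
          rw [PySem.List.map_fst_enumerate] at hj
          have := (PySem.List.mem_pyRange_one).mp hj
          simp only [zero_add, String.length_toList] at this ⊢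
          omega)]
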